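-- pv_equiv track=rewrite | github.com/0xdanelia/scrycall | source/scry_output.py | preserve_newlines_in_columns
-- ===== SOURCE A (Python) =====
-- def preserve_newlines_in_columns(cols):
--     # given a list where each element is a single column,
--     # return a 2D list where each column is preserved, but each newline gets its own row
--     num_cols = len(cols)
--     output_cols = []
--     for i in range(num_cols):
--         output_cols.append([])
--     max_rows = 0
--
--     for i in range(num_cols):
--         split_column = cols[i].split('\n')
--         max_rows = max(max_rows, len(split_column))
--         for col_row in split_column:
--             output_cols[i].append(col_row)
--
--     # insert empty strings into the shorter columns so that the output is consistent
--     for i in range(num_cols):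
--         while len(output_cols[i]) < max_rows:
--             output_cols[i].append('')
--
--     output_rows = []
--     # earlier functions expect each element of the output to be a row, rather than a column
--     for i in range(max_rows):
--         row = []
--         for col in output_cols:
--             row.append(col[i])
--         output_rows.append(row)
--
--     return output_rows
-- ===== SOURCE B (Python) =====
-- def preserve_newlines_in_columns(cols):
--     # fused transpose: repeatedly emit the current heads and strip them,
--     # until every split column is exhausted (no max_rows, no padding pass)
--     split_cols = [col.split('\n') for col in cols]
--     rows = []
--     while any(split_cols):
--         rows.append([(c[0] if c else '') for c in split_cols])
--         split_cols = [c[1:] for c in split_cols]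
--     return rows
-- ===== Notes on version B (the rewrite author's own statement) =====
-- stated objective: simpler
-- what changed: B fuses the three passes of A (compute max_rows, pad each split column with '' and transpose by index) into one head-stripping loop: it repeatedly emits the current first elements of the split columns (using '' when a column is exhausted) and strips them, stopping when all columns are empty, with no max_rows computation, no padding pass and no index arithmetic.
import Mathlib
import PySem

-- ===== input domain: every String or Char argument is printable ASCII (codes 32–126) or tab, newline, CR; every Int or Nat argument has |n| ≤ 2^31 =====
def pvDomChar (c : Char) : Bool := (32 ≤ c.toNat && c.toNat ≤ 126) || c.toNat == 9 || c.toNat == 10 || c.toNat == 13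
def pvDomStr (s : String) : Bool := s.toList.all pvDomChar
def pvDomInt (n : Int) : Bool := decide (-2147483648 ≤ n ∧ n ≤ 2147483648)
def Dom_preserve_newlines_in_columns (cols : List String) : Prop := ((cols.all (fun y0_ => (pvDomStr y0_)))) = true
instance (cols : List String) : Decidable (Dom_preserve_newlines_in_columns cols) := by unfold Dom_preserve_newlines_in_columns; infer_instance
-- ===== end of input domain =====

-- B replaces A's three passes (max_rows computation, padding pass, index transpose) by one
-- fused head-stripping transpose loop; same cost, fewer passes ("simpler"); no side effects.

-- ===== PORT A =====

-- s.split('\n') via PySem.Chars.splitOn (sep ≠ ''), rebuilt as Strings — exact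
def pvSplitNL (s : String) : List String :=
  (PySem.Chars.splitOn s.toList "\n".toList).map (fun cs => String.ofList cs)

-- `while len(output_cols[i]) < max_rows: output_cols[i].append('')` — the while loop as
-- structural recursion on the missing length
def pvPadWhile (l : List String) (m : Nat) : List String :=
  if l.length < m then pvPadWhile (l ++ [""]) m else l
  termination_by m - l.length
  decreasing_by simp; omega

def preserve_newlines_in_columns (cols : List String) : List (List String) :=
  let num_cols := cols.length
  -- for i in range(num_cols): output_cols.append([])
  let output_cols : List (List String) :=
    (List.range num_cols).foldl (fun acc _ => acc ++ [([] : List String)]) []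
  -- main loop: split each column, track max_rows, append the pieces to output_cols[i]
  -- (i always in range, so cols[i] is cols.getD i "")
  let st :=
    (List.range num_cols).foldl
      (fun (st : List (List String) × Nat) i =>
        let split_column := pvSplitNL (cols.getD i "")
        let max_rows := max st.2 split_column.length
        (st.1.set i (split_column.foldl (fun c r => c ++ [r]) (st.1.getD i [])), max_rows))
      (output_cols, 0)
  -- padding pass
  let output_cols2 :=
    (List.range num_cols).foldl (fun oc i => oc.set i (pvPadWhile (oc.getD i []) st.2)) st.1
  -- transpose to rows
  (List.range st.2).foldl
    (fun rows i =>
      rows ++ [output_cols2.foldl (fun row col => row ++ [col.getD i ""]) []])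
    []

-- ===== PORT B =====

-- termination facts for pvZipStrip (cited by name in its decreasing_by)
theorem pvSumDropLe (xss : List (List String)) :
    ((xss.map (fun c => c.drop 1)).map List.length).sum ≤ (xss.map List.length).sum := by
  induction xss with
  | nil => simp
  | cons c t ih => simp only [List.map_cons, List.sum_cons, List.length_drop]; omega

theorem pvSumDropLt (xss : List (List String))
    (h : xss.any (fun c => !c.isEmpty) = true) :
    ((xss.map (fun c => c.drop 1)).map List.length).sum < (xss.map List.length).sum := by
  induction xss with
  | nil => simp at h
  | cons c t ih =>
    simp only [List.map_cons, List.sum_cons, List.length_drop]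
    by_cases hc : c = []
    · subst hc
      simp at h
      have := ih (by simpa using h)
      simpa using this
    · have : 1 ≤ c.length := List.length_pos_iff.mpr hc
      have := pvSumDropLe t
      omega

-- the while loop of Source B: emit heads (c[0] if c else ''), strip (c[1:]), stop when all empty
def pvZipStrip (xss : List (List String)) : List (List String) :=
  if h : xss.any (fun c => !c.isEmpty) = true then
    (xss.map (fun c => c.headD "")) :: pvZipStrip (xss.map (fun c => c.drop 1))
  else []
  termination_by (xss.map List.length).sum
  decreasing_by simpa using pvSumDropLt xss h

def preserve_newlines_in_columns_alt (cols : List String) : List (List String) :=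
  pvZipStrip (cols.map (fun col => pvSplitNL col))

-- ===== PRECONDITION & SPEC =====
def Spec_preserve_newlines_in_columns (cols : List String) (out : List (List String)) : Prop := out = preserve_newlines_in_columns_alt cols
instance (cols : List String) (out : List (List String)) : Decidable (Spec_preserve_newlines_in_columns cols out) := by unfold Spec_preserve_newlines_in_columns; infer_instance

-- ===== CLAIM (what is proved, stated in full; the proofs are below) =====
def Claim_equal_preserve_newlines_in_columns : Prop := ∀ (cols : List String), Dom_preserve_newlines_in_columns cols → Spec_preserve_newlines_in_columns cols (preserve_newlines_in_columns cols)

-- ===== LEMMAS AND PROOFS =====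

-- the common canonical form: row i is the i-th entry of every column (default "")
def pvCanon (ss : List (List String)) (m : Nat) : List (List String) :=
  (List.range m).map (fun i => ss.map (fun s => s.getD i ""))

def pvMaxLen : List (List String) → Nat
  | [] => 0
  | s :: t => max s.length (pvMaxLen t)

-- generic: a foldl that appends one mapped element per step is an append of a map
theorem pvFoldlSnoc {α β : Type} (f : α → β) (l : List α) (init : List β) :
    l.foldl (fun c r => c ++ [f r]) init = init ++ l.map f := by
  induction l generalizing init with
  | nil => simp
  | cons a t ih => simp [List.foldl_cons, ih]

theorem pvGetDAppendCons (A : List (List String)) (x : List String) (B : List (List String)) :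
    (A ++ x :: B).getD A.length [] = x := by
  induction A with
  | nil => rfl
  | cons a t ih => simpa using ih

theorem pvSetAppendCons (A : List (List String)) (x v : List String) (B : List (List String)) :
    (A ++ x :: B).set A.length v = A ++ v :: B := by
  induction A with
  | nil => rfl
  | cons a t ih => simpa using ih

theorem pvFoldlMax (l : List (List String)) (m : Nat) :
    l.foldl (fun m s => max m s.length) m = max m (pvMaxLen l) := by
  induction l generalizing m with
  | nil => simp [pvMaxLen]
  | cons s t ih => simp [List.foldl_cons, ih, pvMaxLen]

-- the initialisation loop builds replicate n []
theorem pvInitLoop (n : Nat) :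
    (List.range n).foldl (fun acc _ => acc ++ [([] : List String)]) [] =
      List.replicate n ([] : List String) := by
  have := pvFoldlSnoc (fun _ : Nat => ([] : List String)) (List.range n) []
  simpa [List.map_const', List.eq_replicate_iff] using this

-- the main loop sets entry j to its split column and folds max over the lengths
theorem pvMainLoop (ss : List (List String)) (g : Nat → List String)
    (hg : ∀ j : Nat, j < ss.length → g j = ss.getD j []) :
    ∀ (k j : Nat) (m : Nat), j + k = ss.length →
      (List.range' j k).foldl
        (fun (st : List (List String) × Nat) i =>
          (st.1.set i ((g i).foldl (fun c r => c ++ [r]) (st.1.getD i [])),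
            max st.2 (g i).length))
        (ss.take j ++ List.replicate k [], m)
      = (ss, (ss.drop j).foldl (fun m s => max m s.length) m) := by
  intro k
  induction k with
  | zero =>
    intro j m hj
    simp only [List.range'_zero, List.foldl_nil]
    have hj' : j = ss.length := by omega
    subst hj'
    simp
  | succ k ih =>
    intro j m hj
    have hjlt : j < ss.length := by omega
    rw [List.range'_succ, List.foldl_cons]
    have htake : (ss.take j).length = j := by simp; omega
    have hgd : ss.getD j [] = ss[j] := by
      simp [List.getD, List.getElem?_eq_getElem hjlt]
    have hdrop : ss.drop j = ss.getD j [] :: ss.drop (j+1) := by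
      rw [List.drop_eq_getElem_cons hjlt, hgd]
    have hget : (ss.take j ++ List.replicate (k+1) ([] : List String)).getD j [] = [] := by
      have := pvGetDAppendCons (ss.take j) [] (List.replicate k [])
      rw [htake] at this
      simpa [List.replicate_succ] using this
    have hfold : (g j).foldl (fun c r => c ++ [r])
        ((ss.take j ++ List.replicate (k+1) ([] : List String)).getD j []) = g j := by
      rw [hget]
      simpa using pvFoldlSnoc (fun r : String => r) (g j) []
    have hset : (ss.take j ++ List.replicate (k+1) ([] : List String)).set j (g j) =
        ss.take (j+1) ++ List.replicate k [] := by
      have h1 := pvSetAppendCons (ss.take j) [] (g j) (List.replicate k [])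
      rw [htake] at h1
      rw [List.replicate_succ, h1]
      have h2 : ss.take (j+1) = ss.take j ++ [g j] := by
        rw [List.take_succ, List.getElem?_eq_getElem hjlt, hg j hjlt, hgd]
        rfl
      rw [h2, List.append_assoc]
      rfl
    simp only [hfold, hset]
    rw [ih (j+1) (max m (g j).length) (by omega)]
    rw [hdrop, List.foldl_cons, hg j hjlt]

theorem pvPadWhileAux (m : Nat) :
    ∀ (k : Nat) (l : List String), m - l.length = k →
      pvPadWhile l m = l ++ List.replicate (m - l.length) "" := by
  intro k
  induction k with
  | zero =>
    intro l hk
    rw [pvPadWhile]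
    have h : ¬ l.length < m := by omega
    simp [h, hk]
  | succ k ih =>
    intro l hk
    have hlt : l.length < m := by omega
    have h2 : m - (l ++ [""]).length = k := by simp; omega
    rw [pvPadWhile, if_pos hlt, ih (l ++ [""]) h2, h2, hk]
    simp [List.replicate_succ]

theorem pvPadWhileEq (m : Nat) (l : List String) :
    pvPadWhile l m = l ++ List.replicate (m - l.length) "" :=
  pvPadWhileAux m (m - l.length) l rfl

-- the padding loop maps pvPadWhile over every entry
theorem pvPadLoop (ss : List (List String)) (M : Nat) :
    ∀ (k j : Nat), j + k = ss.length →
      (List.range' j k).foldl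
        (fun oc i => oc.set i (pvPadWhile (oc.getD i []) M))
        ((ss.map (fun l => pvPadWhile l M)).take j ++ ss.drop j)
      = ss.map (fun l => pvPadWhile l M) := by
  intro k
  induction k with
  | zero =>
    intro j hj
    have hj' : j = ss.length := by omega
    subst hj'
    simp
  | succ k ih =>
    intro j hj
    have hjlt : j < ss.length := by omega
    rw [List.range'_succ, List.foldl_cons]
    have htake : ((ss.map (fun l => pvPadWhile l M)).take j).length = j := by simp; omega
    have hdrop : ss.drop j = ss[j] :: ss.drop (j+1) := List.drop_eq_getElem_cons hjlt
    have hget : ((ss.map (fun l => pvPadWhile l M)).take j ++ ss.drop j).getD j [] = ss[j] := by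
      rw [hdrop]
      have := pvGetDAppendCons ((ss.map (fun l => pvPadWhile l M)).take j) ss[j] (ss.drop (j+1))
      rw [htake] at this
      exact this
    have hset : ((ss.map (fun l => pvPadWhile l M)).take j ++ ss.drop j).set j
          (pvPadWhile ss[j] M)
        = (ss.map (fun l => pvPadWhile l M)).take (j+1) ++ ss.drop (j+1) := by
      rw [hdrop]
      have h1 := pvSetAppendCons ((ss.map (fun l => pvPadWhile l M)).take j) ss[j]
        (pvPadWhile ss[j] M) (ss.drop (j+1))
      rw [htake] at h1
      rw [h1]
      have hjm : j < (ss.map (fun l => pvPadWhile l M)).length := by simpa using hjlt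
      have h2 : (ss.map (fun l => pvPadWhile l M)).take (j+1) =
          (ss.map (fun l => pvPadWhile l M)).take j ++ [pvPadWhile ss[j] M] := by
        rw [List.take_succ, List.getElem?_eq_getElem hjm]
        simp
      rw [h2, List.append_assoc]
      rfl
    rw [hget, hset]
    exact ih (j+1) (by omega)

-- getD through right-padding with "" is getD of the original
theorem pvGetDPad (s : List String) (k i : Nat) :
    (s ++ List.replicate k "").getD i "" = s.getD i "" := by
  by_cases h : i < s.length
  · simp [List.getD, List.getElem?_append_left h]
  · simp only [List.getD, List.getElem?_append_right (by omega : s.length ≤ i)]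
    simp [List.getElem?_replicate, List.getElem?_eq_none (by omega : s.length ≤ i)]
    split <;> simp

-- the transpose loop over padded columns is pvCanon of the unpadded columns
theorem pvRowsLoop (ss : List (List String)) (M : Nat) :
    (List.range M).foldl
      (fun rows i =>
        rows ++ [(ss.map (fun l => pvPadWhile l M)).foldl
          (fun row col => row ++ [col.getD i ""]) []])
      []
    = pvCanon ss M := by
  have hinner : ∀ i : Nat,
      (ss.map (fun l => pvPadWhile l M)).foldl (fun row col => row ++ [col.getD i ""]) []
        = ss.map (fun s => s.getD i "") := by
    intro i
    rw [pvFoldlSnoc (fun col : List String => col.getD i "") _ []]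
    simp only [List.nil_append, List.map_map]
    apply List.map_congr_left
    intro s _
    simp only [Function.comp_apply, pvPadWhileEq]
    exact pvGetDPad s _ i
  calc (List.range M).foldl (fun rows i =>
        rows ++ [(ss.map (fun l => pvPadWhile l M)).foldl
          (fun row col => row ++ [col.getD i ""]) []]) []
      = [] ++ (List.range M).map (fun i =>
          (ss.map (fun l => pvPadWhile l M)).foldl (fun row col => row ++ [col.getD i ""]) []) :=
        pvFoldlSnoc _ _ _
    _ = pvCanon ss M := by
        simp only [List.nil_append, pvCanon]
        exact List.map_congr_left (fun i _ => hinner i)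

-- A computes pvCanon ss (pvMaxLen ss)
theorem pvPortAEq (cols : List String) :
    preserve_newlines_in_columns cols =
      pvCanon (cols.map (fun col => pvSplitNL col))
        (pvMaxLen (cols.map (fun col => pvSplitNL col))) := by
  unfold preserve_newlines_in_columns
  dsimp only
  set ss := cols.map (fun col => pvSplitNL col) with hss
  have hlen : cols.length = ss.length := by simp [hss]
  have hg : ∀ j : Nat, j < ss.length →
      pvSplitNL (cols.getD j "") = ss.getD j [] := by
    intro j hj
    have hj' : j < cols.length := by omega
    rw [List.getD, List.getElem?_eq_getElem hj', List.getD, List.getElem?_eq_getElem hj]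
    simp [hss]
  have hmain := pvMainLoop ss (fun j => pvSplitNL (cols.getD j "")) hg
      ss.length 0 0 (by omega)
  simp only [List.drop_zero, List.take_zero, List.nil_append] at hmain
  rw [pvInitLoop, hlen, List.range_eq_range', hmain]
  rw [pvFoldlMax]
  simp only [Nat.zero_max]
  have hpad := pvPadLoop ss (pvMaxLen ss) ss.length 0 (by omega)
  simp only [List.drop_zero, List.take_zero, List.nil_append] at hpad
  rw [List.range_eq_range', hpad, ← List.range_eq_range']
  exact pvRowsLoop ss (pvMaxLen ss)

-- ---- B side ----

theorem pvMaxLenZeroIff (xss : List (List String)) :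
    pvMaxLen xss = 0 ↔ xss.any (fun c => !c.isEmpty) = false := by
  induction xss with
  | nil => simp [pvMaxLen]
  | cons c t ih =>
    simp [pvMaxLen, List.any_cons, ih, List.isEmpty_iff, List.length_eq_zero_iff]

theorem pvMaxLenDrop (xss : List (List String)) :
    pvMaxLen (xss.map (fun c => c.drop 1)) = pvMaxLen xss - 1 := by
  induction xss with
  | nil => simp [pvMaxLen]
  | cons c t ih =>
    simp only [List.map_cons, pvMaxLen, ih, List.length_drop]
    omega

theorem pvZipStripEq (m : Nat) : ∀ (xss : List (List String)), pvMaxLen xss = m →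
    pvZipStrip xss = pvCanon xss m := by
  induction m with
  | zero =>
    intro xss h
    rw [pvZipStrip]
    rw [pvMaxLenZeroIff] at h
    simp [h, pvCanon]
  | succ m ih =>
    intro xss h
    rw [pvZipStrip]
    have hany : xss.any (fun c => !c.isEmpty) = true := by
      by_contra hc
      have : xss.any (fun c => !c.isEmpty) = false := by
        cases hx : xss.any (fun c => !c.isEmpty) <;> simp_all
      rw [← pvMaxLenZeroIff] at this
      omega
    rw [dif_pos hany]
    have htail := ih (xss.map (fun c => c.drop 1)) (by rw [pvMaxLenDrop, h]; omega)
    rw [htail]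
    unfold pvCanon
    rw [List.range_succ_eq_map, List.map_cons, List.map_map]
    congr 1
    · apply List.map_congr_left
      intro s _
      cases s <;> simp [List.getD]
    · apply List.map_congr_left
      intro i _
      simp only [Function.comp_apply, List.map_map]
      apply List.map_congr_left
      intro s _
      cases s <;> simp [List.getD]

-- ===== VERDICT (by name: the statement is the Claim_ definition above) =====
theorem preserve_newlines_in_columns_spec : Claim_equal_preserve_newlines_in_columns := by
  intro cols _
  unfold Spec_preserve_newlines_in_columns preserve_newlines_in_columns_alt
  rw [pvPortAEq, pvZipStripEq _ _ rfl]
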